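-- pv_equiv track=rewrite | github.com/abdullah-cse27/online-exam-hub | ai_features/cheating_detector.py | calculate_cheating_score
-- ===== SOURCE A (Python) =====
-- def calculate_cheating_score(events):
--
--     score = 0
--
--     for e in events:
--
--         if e == "no_face":
--             score += 2
--
--         elif e == "multiple_faces":
--             score += 5
--
--         elif e == "movement":
--             score += 1
--
--     return score
-- ===== SOURCE B (Python) =====
-- WEIGHTS = {"no_face": 2, "multiple_faces": 5, "movement": 1}
--
-- def calculate_cheating_score(events):
--     return sum(w * events.count(k) for k, w in WEIGHTS.items())
-- ===== Notes on version B (the rewrite author's own statement) =====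
-- stated objective: idiomatic
-- what changed: Instead of one pass over the events with an accumulating if/elif, B iterates over a fixed weight table and makes one events.count(k) scan per event type, summing w * count(k); unknown events are simply never counted.
import Mathlib
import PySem

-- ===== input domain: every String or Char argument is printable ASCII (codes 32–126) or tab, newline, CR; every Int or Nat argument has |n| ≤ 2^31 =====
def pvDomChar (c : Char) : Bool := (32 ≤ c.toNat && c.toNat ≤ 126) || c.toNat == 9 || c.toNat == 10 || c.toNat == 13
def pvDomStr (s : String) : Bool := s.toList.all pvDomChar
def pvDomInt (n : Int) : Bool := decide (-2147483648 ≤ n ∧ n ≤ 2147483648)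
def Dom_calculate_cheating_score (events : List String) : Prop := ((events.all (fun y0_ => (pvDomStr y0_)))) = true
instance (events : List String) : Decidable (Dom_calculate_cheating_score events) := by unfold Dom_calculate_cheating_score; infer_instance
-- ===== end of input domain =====

-- B iterates over a fixed weight table, scanning events.count(k) per key, instead of A's per-event if/elif accumulation (idiomatic; return value only).


-- ===== PORT A =====
def calculate_cheating_score (events : List String) : Int :=
  events.foldl (fun score e =>
    if e == "no_face" then score + 2
    else if e == "multiple_faces" then score + 5
    else if e == "movement" then score + 1
    else score) 0

-- ===== PORT B =====
-- WEIGHTS table (module-level dict; items in insertion order)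
def pvWeights : List (String × Int) := [("no_face", 2), ("multiple_faces", 5), ("movement", 1)]

def calculate_cheating_score_alt (events : List String) : Int :=
  (pvWeights.map (fun kw => kw.2 * (PySem.List.count events kw.1 : Int))).sum

-- ===== PRECONDITION & SPEC =====
def Spec_calculate_cheating_score (events : List String) (out : Int) : Prop := out = calculate_cheating_score_alt events
instance (events : List String) (out : Int) : Decidable (Spec_calculate_cheating_score events out) := by unfold Spec_calculate_cheating_score; infer_instance

-- ===== CLAIM (what is proved, stated in full; the proofs are below) =====
def Claim_equal_calculate_cheating_score : Prop := ∀ (events : List String), Dom_calculate_cheating_score events → Spec_calculate_cheating_score events (calculate_cheating_score events)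

-- ===== LEMMAS AND PROOFS =====
theorem score_foldl_eq (events : List String) (a : Int) :
    events.foldl (fun score e =>
      if e == "no_face" then score + 2
      else if e == "multiple_faces" then score + 5
      else if e == "movement" then score + 1
      else score) a
    = a + 2 * (events.count "no_face" : Int) + 5 * (events.count "multiple_faces" : Int)
        + (events.count "movement" : Int) := by
  induction events generalizing a with
  | nil => simp
  | cons x xs ih =>
    rw [List.foldl_cons, ih]
    simp only [List.count_cons]
    by_cases h1 : x = "no_face" <;> by_cases h2 : x = "multiple_faces" <;>
      by_cases h3 : x = "movement" <;>
      simp only [h1, h2, h3, beq_iff_eq, if_true, if_false] <;>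
      simp_all <;> ring

-- ===== VERDICT (by name: the statement is the Claim_ definition above) =====
theorem calculate_cheating_score_spec : Claim_equal_calculate_cheating_score := by
  intro events _
  unfold Spec_calculate_cheating_score calculate_cheating_score calculate_cheating_score_alt
  rw [score_foldl_eq]
  simp [pvWeights, PySem.List.count_eq]
  ring
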